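-- pv_equiv track=rewrite | github.com/c3045835Newcastle/Dissatation | evaluate_pre_post.py | score_fact_presence
-- ===== SOURCE A (Python) =====
-- from typing import Any, Dict, List, Optional, Tuple
--
-- def score_fact_presence(response: str, keywords: List[str]) -> str:
--     """
--     Rate a single fact slot as Present / Implicit / Absent.
--
--     - Present  : keyword found verbatim (case-insensitive)
--     - Implicit : a closely related synonym or abbreviation found
--     - Absent   : no recognisable reference
--     """
--     resp_lower = response.lower()
--     # Check verbatim
--     for kw in keywords:
--         if kw.lower() in resp_lower:
--             return "present"
--     # Check partial matches (first two chars of each keyword)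
--     for kw in keywords:
--         if kw[:3].lower() in resp_lower:
--             return "implicit"
--     return "absent"
-- ===== SOURCE B (Python) =====
-- def score_fact_presence(response, keywords):
--     resp_lower = response.lower()
--     implicit_found = False
--     for kw in keywords:
--         if kw.lower() in resp_lower:
--             return "present"
--         if kw[:3].lower() in resp_lower:
--             implicit_found = True
--     return "implicit" if implicit_found else "absent"
-- ===== Notes on version B (the rewrite author's own statement) =====
-- stated objective: alternative
-- what changed: Replaces A's two sequential scans over the keyword list with a single pass that returns 'present' on a verbatim match and carries a boolean flag recording whether any prefix match was seen.
import Mathlib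
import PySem

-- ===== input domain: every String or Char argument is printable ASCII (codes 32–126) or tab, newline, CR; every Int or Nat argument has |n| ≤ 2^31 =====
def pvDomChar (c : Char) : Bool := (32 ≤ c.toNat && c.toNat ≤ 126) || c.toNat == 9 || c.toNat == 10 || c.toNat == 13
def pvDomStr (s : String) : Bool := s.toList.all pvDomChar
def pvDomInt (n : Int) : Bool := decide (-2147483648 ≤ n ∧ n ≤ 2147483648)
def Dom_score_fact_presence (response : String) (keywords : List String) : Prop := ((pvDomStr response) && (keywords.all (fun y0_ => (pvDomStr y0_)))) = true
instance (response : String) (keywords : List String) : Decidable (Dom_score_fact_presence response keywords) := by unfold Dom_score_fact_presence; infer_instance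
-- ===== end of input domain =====

-- B replaces A's two sequential scans over the keyword list with a single pass
-- carrying a boolean flag for prefix (implicit) matches; same return value.

-- ===== PORT A =====
-- first loop of A: early return "present" on a verbatim case-insensitive match
def sfpVerbatim (respLower : String) : List String → Bool
  | [] => false
  | kw :: rest =>
    if PySem.Str.isIn (PySem.Str.lower kw) respLower then true
    else sfpVerbatim respLower rest

-- second loop of A: early return "implicit" on a kw[:3] match
def sfpPartial (respLower : String) : List String → Bool
  | [] => false
  | kw :: rest =>
    if PySem.Str.isIn (PySem.Str.lower (PySem.Str.slice kw none (some 3))) respLower then true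
    else sfpPartial respLower rest

def score_fact_presence (response : String) (keywords : List String) : String :=
  let respLower := PySem.Str.lower response
  if sfpVerbatim respLower keywords then "present"
  else if sfpPartial respLower keywords then "implicit"
  else "absent"

-- ===== PORT B =====
-- B's single pass with the implicit_found flag
def sfpAltLoop (respLower : String) (keywords : List String) (implicitFound : Bool) : String :=
  match keywords with
  | [] => if implicitFound then "implicit" else "absent"
  | kw :: rest =>
    if PySem.Str.isIn (PySem.Str.lower kw) respLower then "present"
    else if PySem.Str.isIn (PySem.Str.lower (PySem.Str.slice kw none (some 3))) respLower then
      sfpAltLoop respLower rest true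
    else sfpAltLoop respLower rest implicitFound

def score_fact_presence_alt (response : String) (keywords : List String) : String :=
  sfpAltLoop (PySem.Str.lower response) keywords false

-- ===== PRECONDITION & SPEC =====
def Spec_score_fact_presence (response : String) (keywords : List String) (out : String) : Prop := out = score_fact_presence_alt response keywords
instance (response : String) (keywords : List String) (out : String) : Decidable (Spec_score_fact_presence response keywords out) := by unfold Spec_score_fact_presence; infer_instance

-- ===== CLAIM (what is proved, stated in full; the proofs are below) =====
def Claim_equal_score_fact_presence : Prop := ∀ (response : String) (keywords : List String), Dom_score_fact_presence response keywords → Spec_score_fact_presence response keywords (score_fact_presence response keywords)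

-- ===== LEMMAS AND PROOFS =====
theorem sfpAltLoop_eq (r : String) (ks : List String) (b : Bool) :
    sfpAltLoop r ks b =
      if sfpVerbatim r ks then "present"
      else if b || sfpPartial r ks then "implicit" else "absent" := by
  induction ks generalizing b with
  | nil => cases b <;> simp [sfpAltLoop, sfpVerbatim, sfpPartial]
  | cons kw rest ih =>
    simp only [sfpAltLoop, sfpVerbatim, sfpPartial, ih]
    split_ifs <;> simp_all

-- ===== VERDICT (by name: the statement is the Claim_ definition above) =====
theorem score_fact_presence_spec : Claim_equal_score_fact_presence := by
  intro response keywords _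
  unfold Spec_score_fact_presence score_fact_presence score_fact_presence_alt
  rw [sfpAltLoop_eq]
  simp
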